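-- pv_equiv track=rewrite | github.com/karoberts/adventofcode2022 | 06.py | find_marker
-- ===== SOURCE A (Python) =====
-- def find_marker(buffer, ucount):
--     window_list = []
--     for i, c in enumerate(buffer):
--         if len(window_list) == ucount:
--             window_list.pop(0)
--         window_list.append(c)
--
--         if len(window_list) == ucount and len(set(window_list)) == ucount:
--             return i + 1
--     return -1
-- ===== SOURCE B (Python) =====
-- def find_marker(buffer, ucount):
--     if ucount <= 0:
--         return -1
--     counts = {}
--     distinct = 0
--     for i, c in enumerate(buffer):
--         counts[c] = counts.get(c, 0) + 1
--         if counts[c] == 1: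
--             distinct += 1
--         if i >= ucount:
--             d = buffer[i - ucount]
--             counts[d] -= 1
--             if counts[d] == 0:
--                 distinct -= 1
--         if distinct == ucount:
--             return i + 1
--     return -1
-- ===== Notes on version B (the rewrite author's own statement) =====
-- stated objective: faster
-- what changed: Replaces the list-shifting window with a per-window set() rebuild by a single-pass sliding window that keeps a char-count dict and an incremental distinct counter, so each step is O(1) instead of O(ucount).
-- crash fix: On ucount == 0 with a non-empty buffer A raises IndexError (pop from empty list); B returns -1. — e.g. on find_marker("a", 0): A raises IndexError, B returns -1
import Mathlib
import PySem

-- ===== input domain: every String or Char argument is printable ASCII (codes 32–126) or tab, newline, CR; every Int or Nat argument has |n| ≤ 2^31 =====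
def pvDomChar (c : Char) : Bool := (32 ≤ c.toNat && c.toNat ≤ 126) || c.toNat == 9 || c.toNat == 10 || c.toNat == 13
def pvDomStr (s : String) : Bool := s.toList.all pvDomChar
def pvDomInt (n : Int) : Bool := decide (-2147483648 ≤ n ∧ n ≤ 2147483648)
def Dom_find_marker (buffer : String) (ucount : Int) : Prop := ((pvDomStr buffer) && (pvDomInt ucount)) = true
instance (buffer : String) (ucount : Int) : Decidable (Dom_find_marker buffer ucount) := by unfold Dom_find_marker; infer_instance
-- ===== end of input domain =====

-- B replaces A's list-shifting window + per-step set() rebuild by a one-pass sliding window with a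
-- char-count dict and an incremental distinct counter (O(1) work per character instead of O(ucount)).

-- ===== PORT A =====
-- loop over enumerate(buffer); window_list.pop(0) only fires with a nonempty list whenever ucount ≠ 0
-- (excluded raising inputs aside), so it is ported as `drop 1`.
def pvFindAuxA (ucount : Int) : List (Int × Char) → List Char → Int
  | [], _ => -1
  | (i, c) :: rest, window =>
    let window := if (window.length : Int) = ucount then window.drop 1 else window
    let window := window ++ [c]
    if (window.length : Int) = ucount ∧ ((PySem.Set.ofList window).length : Int) = ucount then i + 1
    else pvFindAuxA ucount rest window

def find_marker (buffer : String) (ucount : Int) : Int :=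
  pvFindAuxA ucount (PySem.List.enumerate buffer.toList) []

-- ===== PORT B =====
-- `buffer[i - ucount]` is in range whenever this branch runs (i ≥ ucount > 0), and the key `d` is then
-- present in counts, so pyGet?/getD with defaults are exact here.
def pvFindAuxB (chars : List Char) (ucount : Int) : List (Int × Char) → PySem.Dict Char Int → Int → Int
  | [], _, _ => -1
  | (i, c) :: rest, counts, distinct =>
    let cnt := counts.getD c 0 + 1
    let counts := counts.insert c cnt
    let distinct := if cnt = 1 then distinct + 1 else distinct
    let st :=
      if i ≥ ucount then
        let d := (PySem.List.pyGet? chars (i - ucount)).getD ' '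
        let cd := counts.getD d 0 - 1
        (counts.insert d cd, if cd = 0 then distinct - 1 else distinct)
      else (counts, distinct)
    if st.2 = ucount then i + 1 else pvFindAuxB chars ucount rest st.1 st.2

def find_marker_alt (buffer : String) (ucount : Int) : Int :=
  if ucount ≤ 0 then -1
  else pvFindAuxB buffer.toList ucount (PySem.List.enumerate buffer.toList) PySem.Dict.empty 0

-- ===== PRECONDITION & SPEC =====
-- Pre_ excludes exactly the inputs where A raises IndexError: ucount == 0 with a non-empty buffer
-- (pop(0) from an empty window list); A returns normally everywhere else.
def Pre_find_marker (buffer : String) (ucount : Int) : Prop := ucount ≠ 0 ∨ buffer = ""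
instance (buffer : String) (ucount : Int) : Decidable (Pre_find_marker buffer ucount) := by
  unfold Pre_find_marker; infer_instance

def pvWitness_find_marker : String × Int := ("mjqjpqmgbljsphdztnvjfqwrcgsmlb", 4)

-- On ucount == 0 with a non-empty buffer A raises IndexError (pop from empty list); B returns -1.
def Raises_find_marker (buffer : String) (ucount : Int) : Prop := ucount = 0 ∧ buffer ≠ ""
instance (buffer : String) (ucount : Int) : Decidable (Raises_find_marker buffer ucount) := by
  unfold Raises_find_marker; infer_instance
def pvRaiseWitness_find_marker : String × Int := ("a", 0)
def pvRaiseWitnessOut_find_marker : Int := -1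

def Spec_find_marker (buffer : String) (ucount : Int) (out : Int) : Prop := out = find_marker_alt buffer ucount
instance (buffer : String) (ucount : Int) (out : Int) : Decidable (Spec_find_marker buffer ucount out) := by unfold Spec_find_marker; infer_instance

-- ===== CLAIM (what is proved, stated in full; the proofs are below) =====
def Claim_equal_find_marker : Prop := ∀ (buffer : String) (ucount : Int), Dom_find_marker buffer ucount → Pre_find_marker buffer ucount → Spec_find_marker buffer ucount (find_marker buffer ucount)

def Claim_raises_find_marker : Prop := (∀ (buffer : String) (ucount : Int), Dom_find_marker buffer ucount → Raises_find_marker buffer ucount → ¬ Pre_find_marker buffer ucount) ∧ (Dom_find_marker (pvRaiseWitness_find_marker.1) (pvRaiseWitness_find_marker.2) ∧ Raises_find_marker (pvRaiseWitness_find_marker.1) (pvRaiseWitness_find_marker.2) ∧ find_marker_alt (pvRaiseWitness_find_marker.1) (pvRaiseWitness_find_marker.2) = pvRaiseWitnessOut_find_marker)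

-- ===== LEMMAS AND PROOFS =====

-- the window A maintains after k characters: the last (at most u) of the first k characters
def pvWin (chars : List Char) (u k : Nat) : List Char := (chars.take k).drop (k - u)

lemma pvWin_length (chars : List Char) (u k : Nat) (hk : k ≤ chars.length) :
    (pvWin chars u k).length = min k u := by
  simp [pvWin]; omega

lemma pvSetLen (l : List Char) : (PySem.Set.ofList l).length = l.toFinset.card := by
  have h1 : (PySem.Set.ofList l).toFinset = l.toFinset := by
    ext a; simp [PySem.Set.mem_ofList]
  rw [← h1, List.toFinset_card_of_nodup (PySem.Set.nodup_ofList l)]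

lemma pvCardCons (d : Char) (l : List Char) :
    (d :: l).toFinset.card = l.toFinset.card + (if d ∈ l then 0 else 1) := by
  have h : (d :: l).toFinset = insert d l.toFinset := by ext a; simp
  by_cases hd : d ∈ l
  · simp [h, hd, Finset.insert_eq_self.mpr (List.mem_toFinset.mpr hd)]
  · simp [h, hd, Finset.card_insert_of_notMem (fun hm => hd (List.mem_toFinset.mp hm))]

lemma pvCardSnoc' (l : List Char) (c : Char) :
    (l ++ [c]).toFinset.card = l.toFinset.card + (if c ∈ l then 0 else 1) := by
  have h : (l ++ [c]).toFinset = (c :: l).toFinset := by ext a; simp [or_comm]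
  rw [h, pvCardCons]

-- main simultaneous induction: both loops agree from any reachable state
lemma pvMain (chars : List Char) (u : Nat) (hu : 1 ≤ u) :
    ∀ (l : List Char) (k : Nat) (counts : PySem.Dict Char Int) (distinct : Int),
      chars.drop k = l →
      (∀ a, counts.getD a 0 = ((pvWin chars u k).count a : Int)) →
      distinct = ((pvWin chars u k).toFinset.card : Int) →
      pvFindAuxA (u : Int) (PySem.List.enumerate l (k : Int)) (pvWin chars u k) =
      pvFindAuxB chars (u : Int) (PySem.List.enumerate l (k : Int)) counts distinct := by
  intro l
  induction l with
  | nil => intro k counts distinct _ _ _; simp [pvFindAuxA, pvFindAuxB]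
  | cons c l' ih =>
    intro k counts distinct hdrop hcounts hdist
    have hk : k < chars.length := by
      by_contra h
      have : chars.drop k = [] := List.drop_eq_nil_of_le (by omega)
      rw [hdrop] at this; simp at this
    have hgetc : chars[k] = c := by
      have h0 : (chars.drop k)[0]? = some c := by rw [hdrop]; rfl
      rw [List.getElem?_drop, Nat.add_zero] at h0
      obtain ⟨_, h⟩ := List.getElem?_eq_some_iff.mp h0
      exact h
    have hdrop' : chars.drop (k + 1) = l' := by
      have h2 : chars.drop k = chars[k] :: chars.drop (k + 1) :=
        List.drop_eq_getElem_cons hk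
      rw [hdrop, hgetc] at h2
      exact ((List.cons_inj_right c).mp h2).symm
    -- the appended window is the next window
    have hWlen : (pvWin chars u k).length = min k u := pvWin_length chars u k (le_of_lt hk)
    have htake : chars.take (k + 1) = chars.take k ++ [c] := by
      rw [List.take_add_one]
      simp [List.getElem?_eq_getElem hk, hgetc]
    have hstep : (if ((pvWin chars u k).length : Int) = (u : Int) then (pvWin chars u k).drop 1 else pvWin chars u k) ++ [c] = pvWin chars u (k + 1) := by
      by_cases hku : u ≤ k
      · have hcond : ((pvWin chars u k).length : Int) = (u : Int) := by
          rw [hWlen]; congr 1; omega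
        rw [if_pos hcond]
        simp only [pvWin, List.drop_drop, htake]
        rw [List.drop_append_of_le_length (by simp; omega)]
        congr 2; omega
      · have hcond : ¬ ((pvWin chars u k).length : Int) = (u : Int) := by
          rw [hWlen]; intro h; omega
        rw [if_neg hcond]
        simp only [pvWin, htake]
        have h1 : k - u = 0 := by omega
        have h2 : k + 1 - u = 0 := by omega
        simp [h1, h2]
    -- counting facts
    have hcnt : counts.getD c 0 + 1 = (((pvWin chars u k) ++ [c]).count c : Int) := by
      rw [hcounts]; simp
    have hcnt1 : (counts.getD c 0 + 1 = 1) ↔ c ∉ pvWin chars u k := by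
      rw [hcounts]
      constructor
      · intro h
        have : ((pvWin chars u k).count c : Int) = 0 := by omega
        have h0 : (pvWin chars u k).count c = 0 := by exact_mod_cast this
        exact List.count_eq_zero.mp h0
      · intro h; rw [List.count_eq_zero.mpr h]; simp
    -- case split on whether the left end falls off
    rw [PySem.List.enumerate_cons]
    by_cases hku : u ≤ k
    · -- removal branch
      have hkuI : ((k : Int) ≥ (u : Int)) := by exact_mod_cast hku
      have hidx : (k : Int) - (u : Int) = ((k - u : Nat) : Int) := by omega
      have hkusub : k - u < chars.length := by omega
      have hdval : (PySem.List.pyGet? chars ((k : Int) - (u : Int))).getD ' ' = chars[k - u] := by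
        rw [hidx, PySem.List.pyGet?_natCast]
        simp [List.getElem?_eq_getElem hkusub]
      -- decompose the extended window:  W ++ [c] = chars[k-u] :: W'
      have hext : pvWin chars u k ++ [c] = chars[k - u] :: pvWin chars u (k + 1) := by
        have hWne : pvWin chars u k = chars[k - u] :: ((chars.take k).drop (k - u + 1)) := by
          simp only [pvWin]
          rw [List.drop_eq_getElem_cons (by simp; omega)]
          simp [List.getElem_take]
        have hW' : pvWin chars u (k + 1) = ((chars.take k).drop (k - u + 1)) ++ [c] := by
          have hcond : ((pvWin chars u k).length : Int) = (u : Int) := by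
            rw [hWlen]; congr 1; omega
          rw [← hstep, if_pos hcond, hWne]
          simp
        rw [hWne, hW']; simp
      set d := chars[k - u] with hd
      set W' := pvWin chars u (k + 1) with hW'def
      -- new counts after insert c then decrement d
      have hc1 : ∀ a, (counts.insert c (counts.getD c 0 + 1)).getD a 0 = (((pvWin chars u k) ++ [c]).count a : Int) := by
        intro a
        rw [PySem.Dict.getD_insert]
        by_cases hac : a = c
        · subst hac; rw [if_pos rfl, hcounts a]; simp
        · simp [hac, hcounts a, List.count_append, Ne.symm hac]
      have hcd : (counts.insert c (counts.getD c 0 + 1)).getD d 0 - 1 = (W'.count d : Int) := by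
        rw [hc1 d, hext]; simp
      have hc2 : ∀ a, ((counts.insert c (counts.getD c 0 + 1)).insert d ((counts.insert c (counts.getD c 0 + 1)).getD d 0 - 1)).getD a 0 = (W'.count a : Int) := by
        intro a
        rw [PySem.Dict.getD_insert]
        by_cases had : a = d
        · subst had; rw [if_pos rfl]; exact hcd
        · simp only [had, if_false]
          rw [hc1 a, hext]
          simp [Ne.symm had]
      have hcd0 : ((counts.insert c (counts.getD c 0 + 1)).getD d 0 - 1 = 0) ↔ d ∉ W' := by
        rw [hcd]
        constructor
        · intro h
          have h0 : W'.count d = 0 := by exact_mod_cast h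
          exact List.count_eq_zero.mp h0
        · intro h; rw [List.count_eq_zero.mpr h]; simp
      have hdist2 : (if (counts.insert c (counts.getD c 0 + 1)).getD d 0 - 1 = 0 then (if counts.getD c 0 + 1 = 1 then distinct + 1 else distinct) - 1 else (if counts.getD c 0 + 1 = 1 then distinct + 1 else distinct)) = (W'.toFinset.card : Int) := by
        have hcardext : (((pvWin chars u k) ++ [c]).toFinset.card : Int) = (if counts.getD c 0 + 1 = 1 then distinct + 1 else distinct) := by
          rw [pvCardSnoc']
          by_cases hc : c ∈ pvWin chars u k
          · rw [if_neg (fun h => (hcnt1.mp h) hc), hdist]; simp [hc]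
          · rw [if_pos (hcnt1.mpr hc), hdist]; simp [hc]
        have hcardcons : (d :: W').toFinset.card = W'.toFinset.card + (if d ∈ W' then 0 else 1) := pvCardCons d W'
        rw [← hext] at hcardcons
        by_cases hdw : d ∈ W'
        · rw [if_neg (fun h => (hcd0.mp h) hdw)]
          rw [← hcardext]
          have h3 := hcardcons; rw [if_pos hdw] at h3; omega
        · rw [if_pos (hcd0.mpr hdw)]
          rw [← hcardext]
          have h3 := hcardcons; rw [if_neg hdw] at h3; omega
      -- unfold one step of each side
      show pvFindAuxA (u : Int) (((k : Int), c) :: PySem.List.enumerate l' ((k : Int) + 1)) (pvWin chars u k) = _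
      rw [pvFindAuxA, pvFindAuxB]
      simp only [hstep, hdval, if_pos hkuI, hdist2]
      -- A's condition ↔ B's condition
      have hWlen' : (W'.length : Int) = (u : Int) := by
        rw [hW'def, pvWin_length chars u (k+1) (by omega)]; congr 1; omega
      have hAcond : ((W'.length : Int) = (u : Int) ∧ ((PySem.Set.ofList W').length : Int) = (u : Int)) ↔ (W'.toFinset.card : Int) = (u : Int) := by
        rw [pvSetLen]; simp [hWlen']
      by_cases hret : (W'.toFinset.card : Int) = (u : Int)
      · rw [if_pos (hAcond.mpr hret), if_pos hret]
      · rw [if_neg (fun h => hret (hAcond.mp h)), if_neg hret]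
        have hk1 : ((k : Int) + 1) = (((k + 1 : Nat)) : Int) := by push_cast; ring
        rw [hk1]
        exact ih (k + 1) _ _ hdrop' hc2 rfl
    · -- no removal: window still growing
      have hkuI : ¬ ((k : Int) ≥ (u : Int)) := by
        intro h; exact hku (by exact_mod_cast h)
      have hextW' : pvWin chars u k ++ [c] = pvWin chars u (k + 1) := by
        have hcond : ¬ ((pvWin chars u k).length : Int) = (u : Int) := by
          rw [hWlen]; intro h; omega
        rw [← hstep, if_neg hcond]
      set W' := pvWin chars u (k + 1) with hW'def
      have hc1 : ∀ a, (counts.insert c (counts.getD c 0 + 1)).getD a 0 = (W'.count a : Int) := by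
        intro a
        rw [PySem.Dict.getD_insert, ← hextW']
        by_cases hac : a = c
        · subst hac; rw [if_pos rfl, hcounts a]; simp
        · simp [hac, hcounts a, List.count_append, Ne.symm hac]
      have hdist1 : (if counts.getD c 0 + 1 = 1 then distinct + 1 else distinct) = (W'.toFinset.card : Int) := by
        rw [← hextW', pvCardSnoc']
        by_cases hc : c ∈ pvWin chars u k
        · rw [if_neg (fun h => (hcnt1.mp h) hc), hdist]; simp [hc]
        · rw [if_pos (hcnt1.mpr hc), hdist]; simp [hc]
      show pvFindAuxA (u : Int) (((k : Int), c) :: PySem.List.enumerate l' ((k : Int) + 1)) (pvWin chars u k) = _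
      rw [pvFindAuxA, pvFindAuxB]
      simp only [hstep, if_neg hkuI, hdist1]
      have hWlen' : (W'.length : Int) = ((min (k + 1) u : Nat) : Int) := by
        rw [hW'def, pvWin_length chars u (k+1) (by omega)]
      have hAcond : ((W'.length : Int) = (u : Int) ∧ ((PySem.Set.ofList W').length : Int) = (u : Int)) ↔ (W'.toFinset.card : Int) = (u : Int) := by
        rw [pvSetLen]
        constructor
        · rintro ⟨_, h2⟩; exact h2
        · intro h
          refine ⟨?_, h⟩
          have hle : W'.toFinset.card ≤ W'.length := List.toFinset_card_le W'
          have hlen : W'.length = min (k + 1) u := by exact_mod_cast hWlen'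
          have hcard : W'.toFinset.card = u := by exact_mod_cast h
          rw [hWlen']; congr 1; omega
      by_cases hret : (W'.toFinset.card : Int) = (u : Int)
      · rw [if_pos (hAcond.mpr hret), if_pos hret]
      · rw [if_neg (fun h => hret (hAcond.mp h)), if_neg hret]
        have hk1 : ((k : Int) + 1) = (((k + 1 : Nat)) : Int) := by push_cast; ring
        rw [hk1]
        exact ih (k + 1) _ _ hdrop' hc1 rfl

lemma pvFindAuxA_neg (ucount : Int) (h : ucount < 0) :
    ∀ (rest : List (Int × Char)) (window : List Char), pvFindAuxA ucount rest window = -1 := by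
  intro rest
  induction rest with
  | nil => intro window; simp [pvFindAuxA]
  | cons p rest ih =>
    intro window
    obtain ⟨i, c⟩ := p
    rw [pvFindAuxA]
    have hlen : ∀ (w : List Char), ¬ ((w.length : Int) = ucount) := by
      intro w hw; omega
    rw [if_neg (hlen window)]
    rw [if_neg (show ¬(((window ++ [c]).length : Int) = ucount ∧ ((PySem.Set.ofList (window ++ [c])).length : Int) = ucount) from fun hcc => hlen _ hcc.1)]
    exact ih _

-- ===== VERDICT (by name: the statement is the Claim_ definition above) =====
theorem find_marker_spec : Claim_equal_find_marker := by
  intro buffer ucount _ hpre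
  unfold Spec_find_marker find_marker find_marker_alt
  rcases lt_trichotomy ucount 0 with hlt | heq | hgt
  · rw [if_pos (le_of_lt hlt)]
    exact pvFindAuxA_neg ucount hlt _ _
  · subst heq
    have hempty : buffer = "" := by
      rcases hpre with h | h
      · exact absurd rfl h
      · exact h
    subst hempty
    simp [pvFindAuxA]
  · rw [if_neg (by omega)]
    have hu : ucount = ((ucount.toNat : Nat) : Int) := by omega
    have hu1 : 1 ≤ ucount.toNat := by omega
    rw [hu]
    have h0 : pvWin buffer.toList ucount.toNat 0 = [] := by simp [pvWin]
    have := pvMain buffer.toList ucount.toNat hu1 buffer.toList 0 PySem.Dict.empty 0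
      (by simp) (by intro a; simp [h0]) (by simp [h0])
    rw [h0] at this
    simpa using this

def find_marker_raises : Claim_raises_find_marker := by
  unfold Claim_raises_find_marker
  constructor
  · intro buffer ucount _ hr hp
    rcases hr with ⟨h0, hne⟩
    rcases hp with h | h
    · exact h h0
    · exact hne h
  · refine ⟨by decide, by decide, by decide⟩
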